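-- pv_equiv track=rewrite | github.com/turumputum/moduleBox | pyTest/mqtt_extended_test.py | _replace_ini_section
-- ===== SOURCE A (Python) =====
-- def _replace_ini_section(text, section_name, new_section_content):
--     """Заменяет секцию [section_name] в INI-тексте."""
--     lines = text.splitlines()
--     result = []; skip = False; found = False
--     for line in lines:
--         s = line.strip()
--         if s.startswith(f"[{section_name}]"):
--             skip = True; found = True
--             result.append(new_section_content.rstrip())
--             continue
--         if skip and s.startswith("["):
--             skip = False
--         if not skip:
--             result.append(line)
--     if not found:
--         result.append("")
--         result.append(new_section_content.rstrip())
--     return "\r\n".join(result) + "\r\n"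
-- ===== SOURCE B (Python) =====
-- def _replace_ini_section(text, section_name, new_section_content):
--     """Two-phase rewrite: split lines into header-delimited segments, then rebuild."""
--     # phase 1: segmentation — a new segment starts at each line whose strip() starts with '['
--     segs = []
--     cur = []
--     for line in text.splitlines():
--         if line.strip().startswith("["):
--             segs.append(cur)
--             cur = [line]
--         else:
--             cur.append(line)
--     segs.append(cur)
--     # phase 2: rebuild — replace every matching segment wholesale, keep the rest verbatim
--     header = "[" + section_name + "]"
--     result = []
--     found = False
--     for seg in segs:
--         if seg and seg[0].strip().startswith(header):
--             found = True
--             result.append(new_section_content.rstrip())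
--         else:
--             result.extend(seg)
--     if not found:
--         result.extend(["", new_section_content.rstrip()])
--     return "\r\n".join(result) + "\r\n"
-- ===== Notes on version B (the rewrite author's own statement) =====
-- stated objective: alternative
-- what changed: Replaces A's one-pass state machine (skip/found flags mutated per line) by a two-phase decomposition: first split the lines into header-delimited segments, then rebuild the output by emitting each segment verbatim or replacing a matching segment wholesale.
import Mathlib
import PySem

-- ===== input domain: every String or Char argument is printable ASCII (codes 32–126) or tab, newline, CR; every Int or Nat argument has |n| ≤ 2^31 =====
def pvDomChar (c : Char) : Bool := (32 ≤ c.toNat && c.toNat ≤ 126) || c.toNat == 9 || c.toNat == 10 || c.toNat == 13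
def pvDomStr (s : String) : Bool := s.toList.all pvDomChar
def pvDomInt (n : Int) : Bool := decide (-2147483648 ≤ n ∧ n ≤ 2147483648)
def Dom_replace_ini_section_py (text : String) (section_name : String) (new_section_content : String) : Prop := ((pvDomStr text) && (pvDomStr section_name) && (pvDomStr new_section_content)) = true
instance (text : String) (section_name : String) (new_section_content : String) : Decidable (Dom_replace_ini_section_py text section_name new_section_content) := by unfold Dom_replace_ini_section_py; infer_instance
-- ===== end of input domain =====

-- B replaces A's one-pass skip/found state machine by a two-phase decomposition
-- (segment the lines at '['-headers, then rebuild segment by segment); objective: alternative.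

-- ===== PORT A =====
-- loop body of A's single for-loop; state = (result, skip, found)
def pvStepA (section_name new_section_content : String)
    (st : List String × Bool × Bool) (line : String) : List String × Bool × Bool :=
  let s := PySem.Str.strip line
  if PySem.Str.startswith s ("[" ++ section_name ++ "]") then
    (st.1 ++ [PySem.Str.rstrip new_section_content], true, true)
  else
    let skip := if st.2.1 && PySem.Str.startswith s "[" then false else st.2.1
    if !skip then (st.1 ++ [line], skip, st.2.2) else (st.1, skip, st.2.2)

def replace_ini_section_py (text : String) (section_name : String) (new_section_content : String) : String :=
  let lines := PySem.Str.splitlines text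
  let st := lines.foldl (pvStepA section_name new_section_content) ([], false, false)
  let result := if !st.2.2 then st.1 ++ ["", PySem.Str.rstrip new_section_content] else st.1
  PySem.Str.join "\r\n" result ++ "\r\n"

-- ===== PORT B =====
-- phase-1 loop body of B: split into segments, a new one at each '['-header line
def pvStepSeg (p : List (List String) × List String) (line : String) :
    List (List String) × List String :=
  if PySem.Str.startswith (PySem.Str.strip line) "[" then (p.1 ++ [p.2], [line])
  else (p.1, p.2 ++ [line])

-- phase-2 loop body of B: rebuild, replacing matching segments; state = (result, found)
def pvStepEmit (section_name new_section_content : String)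
    (st : List String × Bool) (seg : List String) : List String × Bool :=
  match seg with
  | first :: _ =>
    if PySem.Str.startswith (PySem.Str.strip first) ("[" ++ section_name ++ "]") then
      (st.1 ++ [PySem.Str.rstrip new_section_content], true)
    else (st.1 ++ seg, st.2)
  | [] => (st.1 ++ seg, st.2)

def replace_ini_section_py_alt (text : String) (section_name : String) (new_section_content : String) : String :=
  let lines := PySem.Str.splitlines text
  let p := lines.foldl pvStepSeg ([], [])
  let segments := p.1 ++ [p.2]
  let st := segments.foldl (pvStepEmit section_name new_section_content) ([], false)
  let result := if st.2 then st.1 else st.1 ++ ["", PySem.Str.rstrip new_section_content]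
  PySem.Str.join "\r\n" result ++ "\r\n"

-- ===== PRECONDITION & SPEC =====
def Spec_replace_ini_section_py (text : String) (section_name : String) (new_section_content : String) (out : String) : Prop := out = replace_ini_section_py_alt text section_name new_section_content
instance (text : String) (section_name : String) (new_section_content : String) (out : String) : Decidable (Spec_replace_ini_section_py text section_name new_section_content out) := by unfold Spec_replace_ini_section_py; infer_instance

-- ===== CLAIM (what is proved, stated in full; the proofs are below) =====
def Claim_equal_replace_ini_section_py : Prop := ∀ (text : String) (section_name : String) (new_section_content : String), Dom_replace_ini_section_py text section_name new_section_content → Spec_replace_ini_section_py text section_name new_section_content (replace_ini_section_py text section_name new_section_content)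

-- ===== LEMMAS AND PROOFS =====

-- abbreviations for the two line tests
def pvHdr (l : String) : Bool := PySem.Str.startswith (PySem.Str.strip l) "["
def pvMatch (sn l : String) : Bool := PySem.Str.startswith (PySem.Str.strip l) ("[" ++ sn ++ "]")

lemma pvMatch_imp_hdr (sn l : String) (h : pvMatch sn l = true) : pvHdr l = true := by
  unfold pvMatch at h
  unfold pvHdr
  simp only [PySem.Str.startswith_eq] at h ⊢
  rw [PySem.Chars.startswith_iff] at h ⊢
  have : ("[" ++ sn ++ "]").toList = '[' :: (sn.toList ++ [']']) := by simp
  rw [this] at h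
  obtain ⟨t, ht⟩ := h
  exact ⟨sn.toList ++ [']'] ++ t, by simpa using ht⟩

lemma pvMatch_of_not_hdr (sn l : String) (h : pvHdr l = false) : pvMatch sn l = false := by
  by_contra hc
  simp only [Bool.not_eq_false] at hc
  rw [pvMatch_imp_hdr sn l hc] at h
  exact Bool.true_eq_false.mp h

-- recursive characterisation of A's loop
def procA (sn nc : String) : List String → Bool → List String × Bool
  | [], _ => ([], false)
  | l :: ls, skip =>
    if pvMatch sn l then
      (PySem.Str.rstrip nc :: (procA sn nc ls true).1, true)
    else
      (if skip && !pvHdr l then (procA sn nc ls (skip && !pvHdr l)).1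
       else l :: (procA sn nc ls (skip && !pvHdr l)).1,
       (procA sn nc ls (skip && !pvHdr l)).2)

-- the skip flag after A's loop (only needed to state the fold lemma)
def pvSkipF (sn : String) : List String → Bool → Bool
  | [], skip => skip
  | l :: ls, skip => if pvMatch sn l then pvSkipF sn ls true else pvSkipF sn ls (skip && !pvHdr l)

lemma foldA_eq (sn nc : String) : ∀ (ls res : List String) (skip found : Bool),
    List.foldl (pvStepA sn nc) (res, skip, found) ls
      = (res ++ (procA sn nc ls skip).1, pvSkipF sn ls skip, found || (procA sn nc ls skip).2) := by
  intro ls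
  induction ls with
  | nil => intro res skip found; simp [procA, pvSkipF]
  | cons l ls ih =>
    intro res skip found
    have hh : PySem.Chars.startswith (PySem.Chars.strip l.toList) ['['] = pvHdr l := by
      simp [pvHdr]
    by_cases hm : pvMatch sn l
    · have hs : PySem.Chars.startswith (PySem.Chars.strip l.toList) ('[' :: (sn.toList ++ [']'])) = true := by
        simpa [pvMatch] using hm
      simp [List.foldl, pvStepA, hs, ih, procA, pvSkipF, hm]
    · have hs : PySem.Chars.startswith (PySem.Chars.strip l.toList) ('[' :: (sn.toList ++ [']'])) = false := by
        simpa [pvMatch] using hm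
      cases hskip : skip <;> cases hhdr : pvHdr l <;>
        simp [List.foldl, pvStepA, hs, hh, hhdr, hm, procA, pvSkipF, ih, List.append_assoc]

-- recursive characterisation of B's phase 1
def segsFrom : List String → List String → List (List String)
  | cur, [] => [cur]
  | cur, l :: ls => if pvHdr l then cur :: segsFrom [l] ls else segsFrom (cur ++ [l]) ls
  termination_by _ ls => ls.length

lemma foldSeg_eq : ∀ (ls : List String) (segs : List (List String)) (cur : List String),
    (List.foldl pvStepSeg (segs, cur) ls).1 ++ [(List.foldl pvStepSeg (segs, cur) ls).2]
      = segs ++ segsFrom cur ls := by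
  intro ls
  induction ls with
  | nil => intro segs cur; simp [segsFrom]
  | cons l ls ih =>
    intro segs cur
    have hh : PySem.Chars.startswith (PySem.Chars.strip l.toList) ['['] = pvHdr l := by
      simp [pvHdr]
    cases hhdr : pvHdr l <;>
      simp [List.foldl, pvStepSeg, hh, hhdr, ih, segsFrom]

-- what B's phase 2 emits for one segment, and whether the segment matches
def pvEmit (sn nc : String) : List String → List String
  | [] => []
  | f :: t => if pvMatch sn f then [PySem.Str.rstrip nc] else f :: t

def pvMatchSeg (sn : String) : List String → Bool
  | [] => false
  | f :: _ => pvMatch sn f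

lemma foldEmit_eq (sn nc : String) : ∀ (segs : List (List String)) (res : List String) (fnd : Bool),
    List.foldl (pvStepEmit sn nc) (res, fnd) segs
      = (res ++ segs.flatMap (pvEmit sn nc), fnd || segs.any (pvMatchSeg sn)) := by
  intro segs
  induction segs with
  | nil => intro res fnd; simp
  | cons seg segs ih =>
    intro res fnd
    cases seg with
    | nil => simp [List.foldl, pvStepEmit, ih, pvEmit, pvMatchSeg]
    | cons f t =>
      by_cases hm : pvMatch sn f
      · have hs : PySem.Chars.startswith (PySem.Chars.strip f.toList) ('[' :: (sn.toList ++ [']'])) = true := by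
          simpa [pvMatch] using hm
        simp [List.foldl, pvStepEmit, hs, ih, pvEmit, pvMatchSeg, hm]
      · have hs : PySem.Chars.startswith (PySem.Chars.strip f.toList) ('[' :: (sn.toList ++ [']'])) = false := by
          simpa [pvMatch] using hm
        simp [List.foldl, pvStepEmit, hs, ih, pvEmit, pvMatchSeg, hm, List.append_assoc]

lemma matchSeg_append (sn l : String) (cur : List String) (h : pvHdr l = false) :
    pvMatchSeg sn (cur ++ [l]) = pvMatchSeg sn cur := by
  cases cur with
  | nil => simp [pvMatchSeg, pvMatch_of_not_hdr sn l h]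
  | cons c cs => simp [pvMatchSeg]

-- the bridge: flattening B's segments reproduces A's loop output (and the found flag)
lemma mainM (sn nc : String) : ∀ (ls cur : List String),
    (segsFrom cur ls).flatMap (pvEmit sn nc)
        = pvEmit sn nc cur ++ (procA sn nc ls (pvMatchSeg sn cur)).1
  ∧ (segsFrom cur ls).any (pvMatchSeg sn)
        = (pvMatchSeg sn cur || (procA sn nc ls (pvMatchSeg sn cur)).2) := by
  intro ls
  induction ls with
  | nil => intro cur; simp [segsFrom, procA]
  | cons l ls ih =>
    intro cur
    cases hhdr : pvHdr l
    · -- l is not a header: it joins the current segment; A neither starts nor stops skipping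
      have hm : pvMatch sn l = false := pvMatch_of_not_hdr sn l hhdr
      have hms := matchSeg_append sn l cur hhdr
      obtain ⟨ih1, ih2⟩ := ih (cur ++ [l])
      rw [hms] at ih1 ih2
      constructor
      · rw [segsFrom, if_neg (by simp [hhdr]), ih1, procA, if_neg (by simp [hm])]
        simp only [hhdr, Bool.not_false, Bool.and_true]
        cases hcs : pvMatchSeg sn cur
        · -- segment kept: emit (cur ++ [l]) = cur ++ [l] and A appends l
          cases cur with
          | nil => simp [pvEmit, hm]
          | cons c cs =>
            have hmc : pvMatch sn c = false := by simpa [pvMatchSeg] using hcs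
            simp [pvEmit, hmc]
        · -- segment replaced: the extra line is dropped on both sides
          cases cur with
          | nil => simp [pvMatchSeg] at hcs
          | cons c cs =>
            have hmc : pvMatch sn c = true := by simpa [pvMatchSeg] using hcs
            simp [pvEmit, hmc]
      · rw [segsFrom, if_neg (by simp [hhdr]), ih2, procA, if_neg (by simp [hm])]
        simp [hhdr]
    · -- l is a header: a new segment starts here
      obtain ⟨ih1, ih2⟩ := ih [l]
      have hmsl : pvMatchSeg sn [l] = pvMatch sn l := rfl
      rw [hmsl] at ih1 ih2
      constructor
      · rw [segsFrom, if_pos hhdr]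
        by_cases hm : pvMatch sn l
        · rw [procA, if_pos hm]
          simp only [List.flatMap_cons, ih1, hm]
          simp [pvEmit, hm]
        · rw [procA, if_neg (by simp [hm])]
          have hm' : pvMatch sn l = false := by simpa using hm
          simp only [List.flatMap_cons, ih1, hm']
          simp [pvEmit, hm', hhdr]
      · rw [segsFrom, if_pos hhdr]
        by_cases hm : pvMatch sn l
        · rw [procA, if_pos hm]
          simp [ih2, hm, pvMatchSeg]
        · rw [procA, if_neg (by simp [hm])]
          have hm' : pvMatch sn l = false := by simpa using hm
          simp [ih2, hm', hhdr, pvMatchSeg]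

-- ===== VERDICT (by name: the statement is the Claim_ definition above) =====
theorem replace_ini_section_py_spec : Claim_equal_replace_ini_section_py := by
  unfold Claim_equal_replace_ini_section_py
  intro text sn nc _
  unfold Spec_replace_ini_section_py replace_ini_section_py replace_ini_section_py_alt
  have hSeg := foldSeg_eq (PySem.Str.splitlines text) [] []
  have hE := foldEmit_eq sn nc (segsFrom [] (PySem.Str.splitlines text)) [] false
  obtain ⟨hM1, hM2⟩ := mainM sn nc (PySem.Str.splitlines text) []
  simp only [pvMatchSeg, pvEmit, List.nil_append, Bool.false_or] at hM1 hM2 hSeg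
  simp only [foldA_eq, hSeg, hE, hM1, hM2, List.nil_append, Bool.false_or]
  cases hf : (procA sn nc (PySem.Str.splitlines text) false).2 <;> simp
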